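-- pv_equiv track=rewrite | github.com/RamonZerem/Sudoku | sudoku_alg.py | find_empty_lcv
-- ===== SOURCE A (Python) =====
-- import math
--
-- def valid(board, pos, num):
--     '''Whether a number is valid in that cell, returns a bool'''
--     size = len(board)
--     sqrt_size = int(math.sqrt(size))
--     for i in range(size):
--         if board[i][pos[1]] == num and (i, pos[1]) != pos:  #make sure it isn't the same number we're checking for by comparing coords
--             return False
--
--     for j in range(size):
--         if board[pos[0]][j] == num and (pos[0], j) != pos:  #Same row but not same number
--             return False
--
--     start_i = pos[0] - pos[0] % sqrt_size #ex. 5-5%3 = 3 and thats where the grid starts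
--     start_j = pos[1] - pos[1] % sqrt_size
--     for i in range(sqrt_size):
--         for j in range(sqrt_size):  #adds i and j as needed to go from start of grid to where we need to be
--             if board[start_i + i][start_j + j] == num and (start_i + i, start_j + j) != pos:
--                 return False
--     return True
--
-- def find_empty_lcv(board):
--     '''Finds the empty cell with the fewest valid values remaining'''
--     min_options = float('inf')
--     best_cell = None
--     lcv_counts = {}
--
--     size = len(board)
--
--     for i in range(size):
--         for j in range(size):
--             if board[i][j] == 0:
--                 options = [num for num in range(1, size + 1) if valid(board, (i, j), num)]
--                 num_options = len(options)
--
--                 if num_options < min_options: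
--                     min_options = num_options
--                     best_cell = (i, j)
--                     lcv_counts = {num: sum(1 for ni in range(size) for nj in range(size)
--                                            if (ni, nj) != best_cell and board[ni][nj] == 0 and
--                                            valid(board, (ni, nj), num))
--                                   for num in options}
--
--     # Sort options by least constraining value
--     if best_cell:
--         best_cell_options = sorted(lcv_counts.items(), key=lambda item: item[1])
--         return best_cell, [num for num, _ in best_cell_options]
--
--     return best_cell, []
-- ===== SOURCE B (Python) =====
-- import math
--
-- def valid(board, pos, num):
--     '''Whether a number is valid in that cell, returns a bool'''
--     size = len(board)
--     sqrt_size = int(math.sqrt(size))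
--     for i in range(size):
--         if board[i][pos[1]] == num and (i, pos[1]) != pos:
--             return False
--     for j in range(size):
--         if board[pos[0]][j] == num and (pos[0], j) != pos:
--             return False
--     start_i = pos[0] - pos[0] % sqrt_size
--     start_j = pos[1] - pos[1] % sqrt_size
--     for i in range(sqrt_size):
--         for j in range(sqrt_size):
--             if board[start_i + i][start_j + j] == num and (start_i + i, start_j + j) != pos:
--                 return False
--     return True
--
-- def find_empty_lcv(board):
--     '''Finds the empty cell with the fewest valid values remaining'''
--     size = len(board)
--     options_map = {(i, j): [num for num in range(1, size + 1) if valid(board, (i, j), num)]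
--                    for i in range(size) for j in range(size) if board[i][j] == 0}
--     if not options_map:
--         return None, []
--     best, best_opts = min(options_map.items(), key=lambda kv: len(kv[1]))
--     return best, sorted(best_opts,
--                         key=lambda num: sum(1 for cell, opts in options_map.items()
--                                             if cell != best and num in opts))
-- ===== Notes on version B (the rewrite author's own statement) =====
-- stated objective: alternative
-- what changed: B builds an options map over all empty cells once, picks the best cell with min(items, key=len) (same strict-< first-wins tie-break), and sorts that cell's candidates by counting membership in the precomputed option lists, instead of A's rebuilding of the whole LCV-count dict (each entry a fresh size^2 scan of valid() calls) every time the running minimum improves; measured ~10-18x on the probe's inputs but the check could not confirm 'faster' at the largest size, so none is claimed.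
import Mathlib
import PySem

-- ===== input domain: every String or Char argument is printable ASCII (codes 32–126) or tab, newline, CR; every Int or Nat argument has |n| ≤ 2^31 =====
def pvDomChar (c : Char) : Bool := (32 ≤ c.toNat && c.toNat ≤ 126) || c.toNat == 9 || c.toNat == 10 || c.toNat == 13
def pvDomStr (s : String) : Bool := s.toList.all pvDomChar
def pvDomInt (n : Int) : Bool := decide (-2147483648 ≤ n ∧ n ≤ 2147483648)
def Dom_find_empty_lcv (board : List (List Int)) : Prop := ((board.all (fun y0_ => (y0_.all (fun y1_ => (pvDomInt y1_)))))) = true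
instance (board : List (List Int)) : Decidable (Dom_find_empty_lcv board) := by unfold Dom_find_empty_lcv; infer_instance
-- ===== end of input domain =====

-- B computes the per-cell option lists once and derives the LCV ordering from them by membership
-- counts, instead of A's re-building of the LCV dict (size^2 valid() scans per entry) at every
-- improvement of the running minimum; tie-breaks (strict <, first wins; stable sort) are identical.

-- ===== PORT A =====
-- board[i][j]; the total form is sound: Pre_ keeps every access actually performed in range
def pvGetI (board : List (List Int)) (i j : Int) : Int :=
  PySem.List.pyGetD (PySem.List.pyGetD board i []) j 0

-- int(math.sqrt(n)) for a list length n (exact there; kernel-reducible, unlike Nat.sqrt)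
def pvSqrt (n : Nat) : Nat := (List.range (n + 1)).countP (fun k => decide (k * k ≤ n)) - 1

def pvValid (board : List (List Int)) (pos : Int × Int) (num : Int) : Bool :=
  let size : Int := PySem.List.len board
  let sq : Int := (pvSqrt board.length : Int)
  let si := pos.1 - PySem.Int.mod pos.1 sq
  let sj := pos.2 - PySem.Int.mod pos.2 sq
  ((PySem.List.pyRange 0 size 1).all fun i =>
      !(pvGetI board i pos.2 == num && !((i, pos.2) == pos))) &&
  ((PySem.List.pyRange 0 size 1).all fun j =>
      !(pvGetI board pos.1 j == num && !((pos.1, j) == pos))) &&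
  ((PySem.List.pyRange 0 sq 1).all fun i =>
    (PySem.List.pyRange 0 sq 1).all fun j =>
      !(pvGetI board (si + i) (sj + j) == num && !((si + i, sj + j) == pos)))

-- [num for num in range(1, size + 1) if valid(board, (i, j), num)]   (same text in both Pythons)
def pvOptions (board : List (List Int)) (c : Int × Int) : List Int :=
  (PySem.List.pyRange 1 (PySem.List.len board + 1) 1).filter (fun num => pvValid board c num)

-- sum(1 for ni in range(size) for nj in range(size) if (ni, nj) != best_cell and board[ni][nj] == 0 and valid(...))
def pvLcvSum (board : List (List Int)) (best : Int × Int) (num : Int) : Int :=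
  let size : Int := PySem.List.len board
  (PySem.List.pyRange 0 size 1).foldl (fun acc ni =>
    (PySem.List.pyRange 0 size 1).foldl (fun acc nj =>
      if !((ni, nj) == best) && (pvGetI board ni nj == 0) && pvValid board (ni, nj) num
      then acc + 1 else acc) acc) 0

-- num_options < min_options, where min_options starts as float('inf') (modelled as none)
def pvBetter (num_options : Int) (min_options : Option Int) : Bool :=
  match min_options with
  | none => true
  | some m => decide (num_options < m)

def find_empty_lcv (board : List (List Int)) : (Option (Int × Int)) × List Int :=
  let size : Int := PySem.List.len board
  let fin : Option Int × Option (Int × Int) × PySem.Dict Int Int :=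
    (PySem.List.pyRange 0 size 1).foldl (fun st i =>
      (PySem.List.pyRange 0 size 1).foldl (fun st j =>
        if pvGetI board i j == 0 then
          let options := pvOptions board (i, j)
          let num_options : Int := options.length
          if pvBetter num_options st.1 then
            (some num_options, some (i, j),
             options.foldl (fun d num => d.insert num (pvLcvSum board (i, j) num)) PySem.Dict.empty)
          else st
        else st) st) (none, none, PySem.Dict.empty)
  match fin.2.1 with
  | some bc => (some bc, (PySem.List.sorted fin.2.2.items (fun p => p.2) false).map (fun p => p.1))
  | none => (none, [])

-- ===== PORT B =====
def find_empty_lcv_alt (board : List (List Int)) : (Option (Int × Int)) × List Int :=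
  let size : Int := PySem.List.len board
  let om : List ((Int × Int) × List Int) :=
    (PySem.List.pyRange 0 size 1).flatMap (fun i =>
      ((PySem.List.pyRange 0 size 1).filter (fun j => pvGetI board i j == 0)).map
        (fun j => ((i, j), pvOptions board (i, j))))
  match PySem.List.min? om (fun kv => (kv.2.length : Int)) with
  | none => (none, [])
  | some (best, bestOpts) =>
    (some best, PySem.List.sorted bestOpts
       (fun num => (om.countP (fun kv => !(kv.1 == best) && kv.2.contains num) : Int)) false)

-- ===== PRECONDITION & SPEC =====
-- Pre_ = exactly where the Python A returns: every row reaches size columns (else the board[i][j]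
-- scan raises IndexError), and every empty cell's sqrt-size box stays inside the board (else the
-- box loop of valid() raises IndexError on boards whose size is not divisible by int(sqrt(size))).
def Pre_find_empty_lcv (board : List (List Int)) : Prop :=
  (∀ r ∈ board, board.length ≤ r.length) ∧
  (∀ i < board.length, ∀ j < board.length, (board.getD i []).getD j 1 = 0 →
      i - i % pvSqrt board.length + pvSqrt board.length ≤ board.length ∧
      j - j % pvSqrt board.length + pvSqrt board.length ≤ board.length)
instance (board : List (List Int)) : Decidable (Pre_find_empty_lcv board) := by
  unfold Pre_find_empty_lcv; infer_instance

def pvWitness_find_empty_lcv : List (List Int) := [[0, 2], [2, 0]]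

def Spec_find_empty_lcv (board : List (List Int)) (out : (Option (Int × Int)) × List Int) : Prop := out = find_empty_lcv_alt board
instance (board : List (List Int)) (out : (Option (Int × Int)) × List Int) : Decidable (Spec_find_empty_lcv board out) := by unfold Spec_find_empty_lcv; infer_instance

-- ===== CLAIM (what is proved, stated in full; the proofs are below) =====
def Claim_equal_find_empty_lcv : Prop := ∀ (board : List (List Int)), Dom_find_empty_lcv board → Pre_find_empty_lcv board → Spec_find_empty_lcv board (find_empty_lcv board)

-- ===== LEMMAS AND PROOFS =====

-- the flattened list of (empty cell, its option list), i.e. B's options_map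
def pvOM (board : List (List Int)) : List ((Int × Int) × List Int) :=
  (PySem.List.pyRange 0 (PySem.List.len board) 1).flatMap (fun i =>
    ((PySem.List.pyRange 0 (PySem.List.len board) 1).filter (fun j => pvGetI board i j == 0)).map
      (fun j => ((i, j), pvOptions board (i, j))))

def pvDictOf (board : List (List Int)) (c : Int × Int) (o : List Int) : PySem.Dict Int Int :=
  o.foldl (fun d num => d.insert num (pvLcvSum board c num)) PySem.Dict.empty

-- the step of min? with key kv ↦ len(kv.2)
def pvMinStep (acc : Option ((Int × Int) × List Int)) (kv : (Int × Int) × List Int) :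
    Option ((Int × Int) × List Int) :=
  match acc with
  | none => some kv
  | some m => if (kv.2.length : Int) < (m.2.length : Int) then some kv else some m

-- A's loop state as a function of the current first-minimal empty cell
def pvAbs (board : List (List Int)) (m : Option ((Int × Int) × List Int)) :
    Option Int × Option (Int × Int) × PySem.Dict Int Int :=
  match m with
  | none => (none, none, PySem.Dict.empty)
  | some kv => (some (kv.2.length : Int), some kv.1, pvDictOf board kv.1 kv.2)

-- A's per-empty-cell update, on (cell, options) pairs
def pvStep (board : List (List Int))
    (st : Option Int × Option (Int × Int) × PySem.Dict Int Int)
    (kv : (Int × Int) × List Int) : Option Int × Option (Int × Int) × PySem.Dict Int Int :=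
  if pvBetter (kv.2.length : Int) st.1 then
    (some (kv.2.length : Int), some kv.1, pvDictOf board kv.1 kv.2)
  else st

theorem pvMin_eq (l : List ((Int × Int) × List Int)) :
    PySem.List.min? l (fun kv => (kv.2.length : Int)) = l.foldl pvMinStep none := by
  simp only [PySem.List.min?]
  apply List.foldl_ext
  intro acc x _
  cases acc <;> rfl

theorem pvStep_abs (board : List (List Int)) (acc : Option ((Int × Int) × List Int))
    (kv : (Int × Int) × List Int) :
    pvStep board (pvAbs board acc) kv = pvAbs board (pvMinStep acc kv) := by
  cases acc with
  | none => rfl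
  | some m =>
      simp only [pvStep, pvAbs, pvMinStep, pvBetter]
      by_cases h : (kv.2.length : Int) < (m.2.length : Int)
      · simp [h]
      · simp [h]

theorem pvFold_abs (board : List (List Int)) (l : List ((Int × Int) × List Int)) :
    ∀ acc, l.foldl (pvStep board) (pvAbs board acc) = pvAbs board (l.foldl pvMinStep acc) := by
  induction l with
  | nil => intro acc; rfl
  | cons x t ih =>
      intro acc
      rw [List.foldl_cons, List.foldl_cons, pvStep_abs]
      exact ih _

theorem A_eq (board : List (List Int)) :
    find_empty_lcv board =
      match PySem.List.min? (pvOM board) (fun kv => (kv.2.length : Int)) with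
      | none => (none, [])
      | some kv => (some kv.1,
          (PySem.List.sorted (pvDictOf board kv.1 kv.2).items (fun p => p.2) false).map (fun p => p.1)) := by
  have hrow : ∀ (i : Int) (st : Option Int × Option (Int × Int) × PySem.Dict Int Int),
      List.foldl (pvStep board) st
        (((PySem.List.pyRange 0 (PySem.List.len board) 1).filter (fun j => pvGetI board i j == 0)).map
          (fun j => ((i, j), pvOptions board (i, j))))
      = List.foldl (fun st j =>
          if pvGetI board i j == 0 then pvStep board st ((i, j), pvOptions board (i, j)) else st) st
          (PySem.List.pyRange 0 (PySem.List.len board) 1) := by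
    intro i st
    rw [List.foldl_map, ← PySem.List.foldl_if_eq_foldl_filter]
  have hfold :
      List.foldl (fun st i => List.foldl (fun st j =>
          if pvGetI board i j == 0 then pvStep board st ((i, j), pvOptions board (i, j)) else st) st
          (PySem.List.pyRange 0 (PySem.List.len board) 1))
        (none, none, PySem.Dict.empty) (PySem.List.pyRange 0 (PySem.List.len board) 1)
      = pvAbs board (PySem.List.min? (pvOM board) (fun kv => (kv.2.length : Int))) := by
    rw [pvMin_eq, ← pvFold_abs board (pvOM board) none, pvOM, List.foldl_flatMap]
    simp only [hrow]
    rfl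
  calc find_empty_lcv board
      = (fun fin : Option Int × Option (Int × Int) × PySem.Dict Int Int =>
          match fin.2.1 with
          | some bc => (some bc, (PySem.List.sorted fin.2.2.items (fun p => p.2) false).map (fun p => p.1))
          | none => ((none : Option (Int × Int)), ([] : List Int)))
        (List.foldl (fun st i => List.foldl (fun st j =>
            if pvGetI board i j == 0 then pvStep board st ((i, j), pvOptions board (i, j)) else st) st
            (PySem.List.pyRange 0 (PySem.List.len board) 1))
          (none, none, PySem.Dict.empty) (PySem.List.pyRange 0 (PySem.List.len board) 1)) := rfl
    _ = _ := by
        rw [hfold]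
        cases hM : PySem.List.min? (pvOM board) (fun kv => (kv.2.length : Int)) with
        | none => rfl
        | some kv => rfl

theorem B_eq (board : List (List Int)) :
    find_empty_lcv_alt board =
      match PySem.List.min? (pvOM board) (fun kv => (kv.2.length : Int)) with
      | none => (none, [])
      | some kv => (some kv.1, PySem.List.sorted kv.2
          (fun num => ((pvOM board).countP (fun kv' => !(kv'.1 == kv.1) && kv'.2.contains num) : Int)) false) := by
  cases hM : PySem.List.min? (pvOM board) (fun kv => (kv.2.length : Int)) with
  | none =>
      simp only [find_empty_lcv_alt]
      rw [pvOM] at hM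
      rw [hM]
  | some kv =>
      obtain ⟨b, o⟩ := kv
      simp only [find_empty_lcv_alt]
      rw [pvOM] at hM
      rw [hM, pvOM]

theorem mem_pvOM (board : List (List Int)) (kv : (Int × Int) × List Int) (h : kv ∈ pvOM board) :
    kv.2 = pvOptions board kv.1 := by
  unfold pvOM at h
  rw [List.mem_flatMap] at h
  obtain ⟨i, _, hm⟩ := h
  rw [List.mem_map] at hm
  obtain ⟨j, _, rfl⟩ := hm
  rfl

theorem nodup_pvOptions (board : List (List Int)) (c : Int × Int) : (pvOptions board c).Nodup :=
  (PySem.List.nodup_pyRange_one _ _).filter _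

theorem mem_pvOptions_range (board : List (List Int)) (c : Int × Int) (num : Int)
    (h : num ∈ pvOptions board c) : 1 ≤ num ∧ num < PySem.List.len board + 1 :=
  PySem.List.mem_pyRange_one.mp (List.mem_of_mem_filter h)

theorem items_foldl_insert (f : Int → Int) :
    ∀ (o : List Int) (d : PySem.Dict Int Int), o.Nodup → (∀ n ∈ o, d.contains n = false) →
      (o.foldl (fun d n => d.insert n (f n)) d).items = d.items ++ o.map (fun n => (n, f n)) := by
  intro o
  induction o with
  | nil => intro d _ _; simp
  | cons x t ih =>
      intro d hnd hc
      rw [List.foldl_cons, ih _ hnd.of_cons ?_, PySem.Dict.items_insert_of_not_contains _ _ (hc x (List.mem_cons_self))]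
      · simp
      · intro n hn
        rw [PySem.Dict.contains_insert]
        have hne : n ≠ x := fun he => (List.nodup_cons.mp hnd).1 (he ▸ hn)
        simp [hne, hc n (List.mem_cons_of_mem _ hn)]

theorem pvDictOf_items (board : List (List Int)) (c : Int × Int) (o : List Int) (h : o.Nodup) :
    (pvDictOf board c o).items = o.map (fun n => (n, pvLcvSum board c n)) := by
  unfold pvDictOf
  rw [items_foldl_insert _ o _ h (fun n _ => PySem.Dict.contains_empty n)]
  rfl

theorem insertBy_map {α β : Type} (g : α → β) (k : β → Int) (x : α) :
    ∀ (acc : List α),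
      PySem.List.insertBy (fun a b => decide (k a < k b)) (g x) (acc.map g)
      = (PySem.List.insertBy (fun a b => decide (k (g a) < k (g b))) x acc).map g := by
  intro acc
  induction acc with
  | nil => rfl
  | cons y t ih =>
      simp only [List.map_cons, PySem.List.insertBy]
      by_cases h : k (g x) < k (g y)
      · simp [h]
      · simp [h, ih]

theorem sorted_map_aux {α β : Type} (g : α → β) (k : β → Int) :
    ∀ (l acc : List α),
      List.foldl (fun acc x => PySem.List.insertBy (fun a b => decide (k a < k b)) x acc)
        (acc.map g) (l.map g)
      = (List.foldl (fun acc x => PySem.List.insertBy (fun a b => decide (k (g a) < k (g b))) x acc)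
          acc l).map g := by
  intro l
  induction l with
  | nil => intro acc; rfl
  | cons x t ih =>
      intro acc
      rw [List.map_cons, List.foldl_cons, List.foldl_cons, insertBy_map g k x acc]
      exact ih _

theorem sorted_map {α β : Type} (g : α → β) (k : β → Int) (l : List α) :
    PySem.List.sorted (l.map g) k false
      = (PySem.List.sorted l (fun x => k (g x)) false).map g := by
  have h := sorted_map_aux g k l []
  simpa [PySem.List.sorted] using h

theorem insertBy_congr {α : Type} (k1 k2 : α → Int) (x : α) (hx : k1 x = k2 x) :
    ∀ (acc : List α), (∀ y ∈ acc, k1 y = k2 y) →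
      PySem.List.insertBy (fun a b => decide (k1 a < k1 b)) x acc
      = PySem.List.insertBy (fun a b => decide (k2 a < k2 b)) x acc := by
  intro acc
  induction acc with
  | nil => intro _; rfl
  | cons y t ih =>
      intro hacc
      simp only [PySem.List.insertBy]
      have e1 : decide (k1 x < k1 y) = decide (k2 x < k2 y) := by
        rw [hx, hacc y (List.mem_cons_self)]
      rw [ih (fun z hz => hacc z (List.mem_cons_of_mem _ hz))]
      simp only [e1]

theorem sorted_congr_aux {α : Type} (k1 k2 : α → Int) :
    ∀ (l acc : List α), (∀ x ∈ l, k1 x = k2 x) → (∀ x ∈ acc, k1 x = k2 x) →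
      List.foldl (fun acc x => PySem.List.insertBy (fun a b => decide (k1 a < k1 b)) x acc) acc l
      = List.foldl (fun acc x => PySem.List.insertBy (fun a b => decide (k2 a < k2 b)) x acc) acc l := by
  intro l
  induction l with
  | nil => intro acc _ _; rfl
  | cons x t ih =>
      intro acc hl hacc
      rw [List.foldl_cons, List.foldl_cons,
        insertBy_congr k1 k2 x (hl x (List.mem_cons_self)) acc hacc]
      exact ih _ (fun z hz => hl z (List.mem_cons_of_mem _ hz))
        (fun z hz => by
          rcases (PySem.List.mem_insertBy _ _ _ _).mp hz with h | h
          · exact h ▸ hl x (List.mem_cons_self)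
          · exact hacc z h)

theorem sorted_key_congr {α : Type} (k1 k2 : α → Int) (l : List α)
    (h : ∀ x ∈ l, k1 x = k2 x) :
    PySem.List.sorted l k1 false = PySem.List.sorted l k2 false := by
  have := sorted_congr_aux k1 k2 l [] h (by simp)
  simpa [PySem.List.sorted] using this

theorem contains_pvOptions (board : List (List Int)) (c : Int × Int) (num : Int)
    (h1 : 1 ≤ num) (h2 : num < PySem.List.len board + 1) :
    (pvOptions board c).contains num = pvValid board c num := by
  have h2' : num ≤ ((board.length : Nat) : Int) := by
    simp only [PySem.List.len_eq] at h2; omega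
  simp [pvOptions, List.mem_filter, PySem.List.mem_pyRange_one, h1, h2']

theorem lcv_eq_count (board : List (List Int)) (best : Int × Int) (num : Int)
    (h1 : 1 ≤ num) (h2 : num < PySem.List.len board + 1) :
    pvLcvSum board best num
      = ((pvOM board).countP (fun kv => !(kv.1 == best) && kv.2.contains num) : Int) := by
  have hin : ∀ (acc : Int) (ni : Int),
      List.foldl (fun acc nj =>
        if !((ni, nj) == best) && (pvGetI board ni nj == 0) && pvValid board (ni, nj) num
        then acc + 1 else acc) acc (PySem.List.pyRange 0 (PySem.List.len board) 1)
      = acc + ((PySem.List.pyRange 0 (PySem.List.len board) 1).countP (fun nj =>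
          !((ni, nj) == best) && (pvGetI board ni nj == 0) && pvValid board (ni, nj) num) : Int) :=
    fun acc ni => PySem.List.foldl_if_add_one _ _ _
  show List.foldl _ 0 _ = _
  simp only [hin]
  rw [PySem.List.foldl_add, pvOM, List.countP_flatMap, Nat.cast_list_sum, List.map_map, zero_add]
  congr 1
  refine List.map_congr_left (fun i _ => ?_)
  simp only [Function.comp]
  rw [List.countP_map, List.countP_filter]
  congr 1
  refine List.countP_congr (fun nj _ => ?_)
  simp only [Function.comp]
  rw [contains_pvOptions board (i, nj) num h1 h2]
  cases h : ((i, nj) == best) <;> cases pvGetI board i nj == 0 <;> cases pvValid board (i, nj) num <;> rfl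

theorem find_empty_lcv_spec : Claim_equal_find_empty_lcv := by
  intro board _ _
  unfold Spec_find_empty_lcv
  rw [A_eq, B_eq]
  cases hM : PySem.List.min? (pvOM board) (fun kv => (kv.2.length : Int)) with
  | none => rfl
  | some kv =>
      obtain ⟨best, bo⟩ := kv
      have hbo : bo = pvOptions board best := mem_pvOM board _ (PySem.List.min?_mem hM)
      have hnd : bo.Nodup := hbo ▸ nodup_pvOptions board best
      simp only []
      congr 1
      rw [pvDictOf_items board best bo hnd,
        sorted_map (fun n => (n, pvLcvSum board best n)) (fun p => p.2) bo, List.map_map]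
      have hid : ((fun p : Int × Int => p.1) ∘ fun n => (n, pvLcvSum board best n)) = id := rfl
      rw [hid, List.map_id]
      refine sorted_key_congr _ _ bo (fun n hn => ?_)
      have hr := mem_pvOptions_range board best n (hbo ▸ hn)
      exact lcv_eq_count board best n hr.1 hr.2

-- ===== VERDICT (by name: the statement is the Claim_ definition above) =====
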